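-- pv_equiv track=rewrite | github.com/Sonic-5090/django-text-analysis | analyzer/utils.py | count_word_matches
-- ===== SOURCE A (Python) =====
-- from typing import Dict, List, Tuple
--
-- def count_word_matches(text: str, word_dict: Dict[str, int]) -> Tuple[int, List[str]]:
--     """Count matches and return total score + matched words."""
--     text_lower = text.lower()
--     total_score = 0
--     matched_words = []
--
--     # Sort by length descending to match longer phrases first
--     sorted_words = sorted(word_dict.keys(), key=len, reverse=True)
--
--     for word in sorted_words:
--         if word in text_lower:
--             total_score += word_dict[word]
--             matched_words.append(word)
--
--     return total_score, matched_words
-- ===== SOURCE B (Python) =====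
-- def count_word_matches(text, word_dict):
--     """Count matches and return total score + matched words.
--
--     Indexes the text once: builds the set of all substrings whose length is
--     the length of some dictionary word, then each word is a set lookup
--     instead of a substring scan of the whole text."""
--     t = text.lower()
--     n = len(t)
--     lengths = {len(w) for w in word_dict}
--     subs = set()
--     for L in lengths:
--         for j in range(n - L + 1):
--             subs.add(t[j:j + L])
--     total = 0
--     matched = []
--     for w in sorted(word_dict, key=len, reverse=True):
--         if w in subs:
--             total += word_dict[w]
--             matched.append(w)
--     return total, matched
-- ===== Notes on version B (the rewrite author's own statement) =====
-- stated objective: alternative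
-- what changed: B indexes the lowered text once into a set of all substrings whose length is some dictionary word's length, turning each per-word substring scan of the whole text into a single set lookup.
import Mathlib
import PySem

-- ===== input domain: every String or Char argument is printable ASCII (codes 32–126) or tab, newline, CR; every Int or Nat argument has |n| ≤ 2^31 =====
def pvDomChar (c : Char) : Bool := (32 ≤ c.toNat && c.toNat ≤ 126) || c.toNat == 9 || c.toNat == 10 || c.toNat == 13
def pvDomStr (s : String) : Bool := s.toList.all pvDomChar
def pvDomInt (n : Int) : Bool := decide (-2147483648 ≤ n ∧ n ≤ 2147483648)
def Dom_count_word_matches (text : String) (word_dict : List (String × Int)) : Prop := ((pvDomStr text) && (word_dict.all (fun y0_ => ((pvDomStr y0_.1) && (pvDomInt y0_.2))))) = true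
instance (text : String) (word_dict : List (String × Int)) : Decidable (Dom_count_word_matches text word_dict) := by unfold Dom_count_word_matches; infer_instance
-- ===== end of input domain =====

-- ===== PORT A =====
-- port of A: lowercase the text, sort the dict keys by length descending, per-word substring scan
def count_word_matches (text : String) (word_dict : List (String × Int)) : Int × List String :=
  let text_lower := PySem.Str.lower text
  let d := PySem.Dict.ofList word_dict
  -- sorted(word_dict.keys(), key=len, reverse=True)
  let sorted_words := PySem.List.sorted d.keys (fun w => PySem.Str.len w) true
  sorted_words.foldl
    (fun acc word =>
      if PySem.Str.isIn word text_lower then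
        -- word_dict[word]: word is a key of d, so the default 0 is never used
        (acc.1 + d.getD word 0, acc.2 ++ [word])
      else acc)
    (0, [])

-- ===== PORT B =====
-- port of B: build the set of all substrings of the lowered text whose length is the length of
-- some dictionary word, then each word is a set lookup instead of a scan of the text
def count_word_matches_alt (text : String) (word_dict : List (String × Int)) : Int × List String :=
  let t := PySem.Str.lower text
  let n := PySem.Str.len t
  let d := PySem.Dict.ofList word_dict
  let lengths : PySem.Set Int := PySem.Set.ofList (d.keys.map (fun w => PySem.Str.len w))
  let subs : PySem.Set String :=
    lengths.foldl
      (fun s L =>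
        (PySem.List.pyRange 0 (n - L + 1) 1).foldl
          (fun s j => PySem.Set.add s (PySem.Str.slice t (some j) (some (j + L)))) s)
      PySem.Set.empty
  let sorted_words := PySem.List.sorted d.keys (fun w => PySem.Str.len w) true
  sorted_words.foldl
    (fun acc word =>
      if PySem.Set.contains subs word then
        (acc.1 + d.getD word 0, acc.2 ++ [word])
      else acc)
    (0, [])

-- ===== PRECONDITION & SPEC =====
def Spec_count_word_matches (text : String) (word_dict : List (String × Int)) (out : Int × List String) : Prop := out = count_word_matches_alt text word_dict
instance (text : String) (word_dict : List (String × Int)) (out : Int × List String) : Decidable (Spec_count_word_matches text word_dict out) := by unfold Spec_count_word_matches; infer_instance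

-- ===== CLAIM (what is proved, stated in full; the proofs are below) =====
def Claim_equal_count_word_matches : Prop := ∀ (text : String) (word_dict : List (String × Int)), Dom_count_word_matches text word_dict → Spec_count_word_matches text word_dict (count_word_matches text word_dict)

-- ===== LEMMAS AND PROOFS =====

-- membership in B's nested substring-collecting fold
theorem pv_mem_subs_fold (t : String) (Ls : List Int) (s0 : PySem.Set String) (y : String) :
    y ∈ Ls.foldl
        (fun s L =>
          (PySem.List.pyRange 0 (PySem.Str.len t - L + 1) 1).foldl
            (fun s j => PySem.Set.add s (PySem.Str.slice t (some j) (some (j + L)))) s) s0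
      ↔ y ∈ s0 ∨ ∃ L ∈ Ls, ∃ j : Int,
          (0 ≤ j ∧ j < PySem.Str.len t - L + 1) ∧ y = PySem.Str.slice t (some j) (some (j + L)) := by
  induction Ls generalizing s0 with
  | nil => simp
  | cons L Ls ih =>
    simp only [List.foldl_cons, ih, PySem.Set.mem_foldl_add, List.mem_cons,
      PySem.List.mem_pyRange_one]
    constructor
    · rintro (⟨h0 | ⟨j, hj, rfl⟩⟩ | ⟨L', hL', j, hj, rfl⟩)
      · exact Or.inl h0
      · exact Or.inr ⟨L, Or.inl rfl, j, hj, rfl⟩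
      · exact Or.inr ⟨L', Or.inr hL', j, hj, rfl⟩
    · rintro (h0 | ⟨L', hL' | hL', j, hj, rfl⟩)
      · exact Or.inl (Or.inl h0)
      · subst hL'; exact Or.inl (Or.inr ⟨j, hj, rfl⟩)
      · exact Or.inr ⟨L', hL', j, hj, rfl⟩

-- a slice of the text is a substring of the text
theorem pv_slice_isIn (t w : String) (L j : Int) (hL : 0 ≤ L) (hj : 0 ≤ j)
    (h : w = PySem.Str.slice t (some j) (some (j + L))) : PySem.Str.isIn w t = true := by
  rw [PySem.Str.isIn_eq, ← PySem.Chars.exists_prefix_drop_iff_isIn]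
  refine ⟨j.toNat, ?_⟩
  have : w.toList = (t.toList.drop j.toNat).take ((j + L).toNat - j.toNat) := by
    rw [h, PySem.Str.toList_slice, PySem.Chars.slice_eq_listSlice,
      PySem.List.slice_toNat t.toList hj (by omega)]
  rw [this]
  exact List.take_prefix _ _

-- a substring of the text is a slice of the text at some admissible offset
theorem pv_isIn_slice (t w : String) (h : PySem.Str.isIn w t = true) :
    ∃ j : Int, (0 ≤ j ∧ j < PySem.Str.len t - PySem.Str.len w + 1) ∧
      w = PySem.Str.slice t (some j) (some (j + PySem.Str.len w)) := by
  rw [PySem.Str.isIn_eq, ← PySem.Chars.exists_prefix_drop_iff_isIn] at h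
  obtain ⟨j, hpre⟩ := h
  set j0 := min j t.toList.length with hj0def
  have hj0 : j0 ≤ t.toList.length := min_le_right _ _
  have hpre0 : w.toList <+: t.toList.drop j0 := by
    by_cases hle : j ≤ t.toList.length
    · rw [hj0def, min_eq_left hle]; exact hpre
    · have hnil : t.toList.drop j = [] := List.drop_eq_nil_of_le (by omega)
      have : w.toList = [] := List.prefix_nil.mp (hnil ▸ hpre)
      simp [this]
  have hlen : w.toList.length ≤ t.toList.length - j0 := by
    have h2 := hpre0.length_le
    rw [List.length_drop] at h2
    exact h2
  refine ⟨(j0 : Int), ⟨by positivity, ?_⟩, ?_⟩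
  · simp only [PySem.Str.len_eq]
    omega
  · rw [← String.toList_inj]
    simp only [PySem.Str.len_eq, PySem.Str.toList_slice, PySem.Chars.slice_eq_listSlice]
    rw [PySem.List.slice_natCast_add t.toList j0 w.toList.length]
    exact List.prefix_iff_eq_take.mp hpre0

-- for a dictionary key, membership in B's substring set is A's substring test
theorem pv_contains_subs_eq (t : String) (keys : List String) (w : String) (hw : w ∈ keys) :
    PySem.Set.contains
      ((PySem.Set.ofList (keys.map (fun w => PySem.Str.len w)) : PySem.Set Int).foldl
        (fun s L =>
          (PySem.List.pyRange 0 (PySem.Str.len t - L + 1) 1).foldl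
            (fun s j => PySem.Set.add s (PySem.Str.slice t (some j) (some (j + L)))) s)
        PySem.Set.empty) w
      = PySem.Str.isIn w t := by
  rw [Bool.eq_iff_iff, PySem.Set.contains_iff, pv_mem_subs_fold]
  constructor
  · rintro (h0 | ⟨L, hL, j, ⟨hj0, hj1⟩, heq⟩)
    · simp [PySem.Set.empty] at h0
    · have hL0 : 0 ≤ L := by
        obtain ⟨w', _, rfl⟩ := List.mem_map.mp ((PySem.Set.mem_ofList _ _).mp hL)
        simp [PySem.Str.len_eq]
      exact pv_slice_isIn t w L j hL0 hj0 heq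
  · intro h
    obtain ⟨j, hj, heq⟩ := pv_isIn_slice t w h
    exact Or.inr ⟨PySem.Str.len w,
      (PySem.Set.mem_ofList _ _).mpr (List.mem_map.mpr ⟨w, hw, rfl⟩), j, hj, heq⟩

-- ===== VERDICT (by name: the statement is the Claim_ definition above) =====
theorem count_word_matches_spec : Claim_equal_count_word_matches := by
  intro text word_dict _
  unfold Spec_count_word_matches count_word_matches count_word_matches_alt
  apply PySem.List.foldl_congr_mem
  intro acc word hword
  have hk : word ∈ (PySem.Dict.ofList word_dict).keys :=
    (PySem.List.mem_sorted _ _ _ _).mp hword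
  rw [pv_contains_subs_eq (PySem.Str.lower text) (PySem.Dict.ofList word_dict).keys word hk]
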